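-- pv_equiv track=rewrite | github.com/Err0rCode7/algorithm | Book_이코테/fourth_try/Dfs_Bfs/bracket convert.py | convert
-- ===== SOURCE A (Python) =====
-- import collections, sys
--
-- def isValid(p) :
-- 	stack = collections.deque()
--
-- 	for i in range(len(p)):
-- 		if p[i] == '(':
-- 			stack.append(i)
-- 		else :
-- 			if not stack :
-- 				return False
-- 			else :
-- 				stack.pop()
-- 	return False if stack else True
--
-- def reverse(p):
-- 	result = ""
-- 	for c in p :
-- 		result += '(' if c == ')' else ')'
-- 	return result
--
-- def convert(p) :
-- 	if len(p) == 0: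
-- 		return p
--
-- 	left, right = 0, 0
-- 	for index in range(len(p)):
-- 		if p[index] == '(':
-- 			left += 1
-- 		if p[index] == ')':
-- 			right += 1
-- 		if left > 0 and left == right:
-- 			break
-- 	u = p[:index + 1]
-- 	v = p[index + 1:]
-- 	if isValid(u):
-- 		return u + convert(v)
-- 	else :
-- 		return '(' + convert(v) + ')' + reverse(u[1:-1])
-- ===== SOURCE B (Python) =====
-- def convert(p):
--     # One fully iterative pass: no recursion, no separate validity/flip scans.
--     # Walk p once, keeping the current unit's chars plus its '('/')' counts and
--     # the running validity state (ok, depth); each time a unit closes, push it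
--     # onto a growing prefix (valid unit) or wrap the remaining output between
--     # '(' ... ')' + flipped middle via a prefix and a suffix accumulator.
--     pre = []
--     suf = []
--     cur = []
--     left = right = 0
--     ok = True
--     depth = 0
--     for c in p:
--         cur.append(c)
--         if c == '(':
--             left += 1
--             depth += 1
--         else:
--             if c == ')':
--                 right += 1
--             if depth == 0:
--                 ok = False
--             else:
--                 depth -= 1
--         if left > 0 and left == right:
--             if ok and depth == 0:
--                 pre.extend(cur)
--             else:
--                 pre.append('(')
--                 suf = [')'] + ['(' if ch == ')' else ')' for ch in cur[1:-1]] + suf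
--             cur = []
--             left = right = 0
--             ok = True
--             depth = 0
--     if cur:
--         if ok and depth == 0:
--             pre.extend(cur)
--         else:
--             pre.append('(')
--             suf = [')'] + ['(' if ch == ')' else ')' for ch in cur[1:-1]] + suf
--     return ''.join(pre) + ''.join(suf)
-- ===== Notes on version B (the rewrite author's own statement) =====
-- stated objective: alternative
-- what changed: Replaces A's recursion (each call re-scanning a prefix, with a deque-based validity check and a separate flip pass) by one fully iterative pass over the characters that tracks the current unit's counts and validity state inline and builds the answer with a prefix accumulator and a suffix accumulator.
import Mathlib
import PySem

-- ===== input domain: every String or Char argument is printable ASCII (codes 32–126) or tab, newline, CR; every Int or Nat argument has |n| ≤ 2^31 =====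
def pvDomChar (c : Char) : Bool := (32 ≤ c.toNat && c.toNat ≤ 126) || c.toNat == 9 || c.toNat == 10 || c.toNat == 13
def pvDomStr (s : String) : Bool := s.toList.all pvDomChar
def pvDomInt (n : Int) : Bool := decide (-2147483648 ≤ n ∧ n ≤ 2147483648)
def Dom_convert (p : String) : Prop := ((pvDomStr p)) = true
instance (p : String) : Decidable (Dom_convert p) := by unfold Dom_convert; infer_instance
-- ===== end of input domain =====

-- B replaces A's recursion (prefix re-scan + deque validity check + flip pass per call)
-- by one iterative pass with inline counts/validity state and prefix/suffix accumulators
-- (alternative decomposition, same result proved equal on all Dom strings).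

-- ===== PORT A =====

-- A's isValid: deque of indices, push on '(', pop (or fail) otherwise; 'False if stack else True'.
def isValidLoop : List Char → List Nat → Nat → Bool
  | [], stack, _ => if stack.isEmpty then true else false
  | c :: rest, stack, i =>
      if c = '(' then isValidLoop rest (i :: stack) (i + 1)
      else if stack.isEmpty then false
      else isValidLoop rest stack.tail (i + 1)

-- A's reverse: result = ""; for c in p: result += '(' if c == ')' else ')'
def revA (cs : List Char) : List Char :=
  cs.foldl (fun acc c => acc ++ [if c = ')' then '(' else ')']) []

-- A's index-finding loop: left/right updated at each char; break when left > 0 and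
-- left = right; if the loop runs out, index is the last position (offset form).
def idxLoopA : List Char → Nat → Nat → Nat
  | [], _, _ => 0
  | c :: rest, l, r =>
      if 0 < (if c = '(' then l + 1 else l) ∧
          (if c = '(' then l + 1 else l) = (if c = ')' then r + 1 else r) then 0
      else match rest with
           | [] => 0
           | _ :: _ => 1 + idxLoopA rest (if c = '(' then l + 1 else l) (if c = ')' then r + 1 else r)

-- A's convert on the character list; u = p[:index+1], v = p[index+1:] (take/drop are
-- exact for these nonnegative slice bounds), u[1:-1] via PySem.List.slice.
def convertA (cs : List Char) : List Char :=
  if h : cs = [] then cs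
  else
    let index := idxLoopA cs 0 0
    let u := cs.take (index + 1)
    let v := cs.drop (index + 1)
    if isValidLoop u [] 0 then u ++ convertA v
    else '(' :: convertA v ++ ')' :: revA (PySem.List.slice u (some 1) (some (-1)))
termination_by cs.length
decreasing_by
  all_goals
    have hp : 0 < cs.length := List.length_pos_iff.mpr h
    simp only [List.length_drop]
    omega

def convert (p : String) : String := String.mk (convertA p.toList)

-- ===== PORT B =====

-- B's per-char validity update: '(': depth += 1; other char at depth 0: ok := False;
-- otherwise depth -= 1 (the pair is (ok, depth)).
def stepB (s : Bool × Nat) (c : Char) : Bool × Nat :=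
  if c = '(' then (s.1, s.2 + 1)
  else if s.2 = 0 then (false, 0)
  else (s.1, s.2 - 1)

-- B's comprehension '(' if ch == ')' else ')' over a char list.
def flipB (cs : List Char) : List Char :=
  cs.map (fun c => if c = ')' then '(' else ')')

-- B's single loop: state = (current unit's chars, reversed since Python appends;
-- its '('/')' counts; its (ok, depth) validity state; the prefix and suffix
-- accumulators). Unit-end (left > 0 and left = right, or end of input with a
-- nonempty unit) pushes the unit onto pre if valid, else wraps via pre/suf.
def goB : List Char → List Char → Nat → Nat → Bool × Nat → List Char → List Char → List Char
  | [], cur, _, _, s, pre, suf =>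
      if cur = [] then pre ++ suf
      else if s.1 && s.2 == 0 then (pre ++ cur.reverse) ++ suf
      else (pre ++ ['(']) ++ (')' :: flipB (PySem.List.slice cur.reverse (some 1) (some (-1))) ++ suf)
  | c :: rest, cur, l, r, s, pre, suf =>
      let l' := if c = '(' then l + 1 else l
      let r' := if c = ')' then r + 1 else r
      let s' := stepB s c
      if 0 < l' ∧ l' = r' then
        if s'.1 && s'.2 == 0 then
          goB rest [] 0 0 (true, 0) (pre ++ (c :: cur).reverse) suf
        else
          goB rest [] 0 0 (true, 0) (pre ++ ['('])
            (')' :: flipB (PySem.List.slice (c :: cur).reverse (some 1) (some (-1))) ++ suf)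
      else goB rest (c :: cur) l' r' s' pre suf

def convert_alt (p : String) : String := String.mk (goB p.toList [] 0 0 (true, 0) [] [])

-- ===== PRECONDITION & SPEC =====
def Spec_convert (p : String) (out : String) : Prop := out = convert_alt p
instance (p : String) (out : String) : Decidable (Spec_convert p out) := by unfold Spec_convert; infer_instance

-- ===== CLAIM (what is proved, stated in full; the proofs are below) =====
def Claim_equal_convert : Prop := ∀ (p : String), Dom_convert p → Spec_convert p (convert p)

-- ===== LEMMAS AND PROOFS =====

-- Proof-only intermediate form: p split into its shortest units, then a foldr.
def balB : List Char → Nat → Bool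
  | [], depth => depth == 0
  | c :: rest, depth =>
      if c = '(' then balB rest (depth + 1)
      else if depth = 0 then false
      else balB rest (depth - 1)

def unitsGo : List Char → List Char → Nat → Nat → List (List Char)
  | [], cur, _, _ => if cur = [] then [] else [cur.reverse]
  | c :: rest, cur, l, r =>
      if 0 < (if c = '(' then l + 1 else l) ∧
          (if c = '(' then l + 1 else l) = (if c = ')' then r + 1 else r) then
        (c :: cur).reverse :: unitsGo rest [] 0 0
      else unitsGo rest (c :: cur) (if c = '(' then l + 1 else l) (if c = ')' then r + 1 else r)

def foldUnits (us : List (List Char)) : List Char :=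
  us.foldr
    (fun u rest =>
      if balB u 0 then u ++ rest
      else '(' :: rest ++ ')' :: flipB (PySem.List.slice u (some 1) (some (-1))))
    []

-- A's deque validity check only depends on the stack's size: it equals the counter scan.
theorem isValid_eq_bal (cs : List Char) : ∀ (stack : List Nat) (i : Nat),
    isValidLoop cs stack i = balB cs stack.length := by
  induction cs with
  | nil =>
      intro stack i
      cases stack <;> simp [isValidLoop, balB]
  | cons c rest ih =>
      intro stack i
      by_cases hc : c = '('
      · simp [isValidLoop, balB, hc, ih]
      · cases stack with
        | nil => simp [isValidLoop, balB, hc]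
        | cons s t => simp [isValidLoop, balB, hc, ih]

-- A's string-building flip loop equals B's map.
theorem revA_fold (cs : List Char) : ∀ acc : List Char,
    List.foldl (fun acc c => acc ++ [if c = ')' then '(' else ')']) acc cs = acc ++ flipB cs := by
  induction cs with
  | nil => intro acc; simp [flipB]
  | cons c rest ih =>
      intro acc
      rw [List.foldl_cons, ih]
      simp [flipB]

theorem revA_eq_flip (cs : List Char) : revA cs = flipB cs := by
  unfold revA
  rw [show cs.foldl (fun acc c => acc ++ [if c = ')' then '(' else ')']) [] =
        List.foldl (fun acc c => acc ++ [if c = ')' then '(' else ')']) [] cs from rfl,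
      revA_fold]
  simp

-- The splitting pass peels off exactly the prefix A's index loop identifies.
theorem unitsGo_split (cs : List Char) : ∀ (acc : List Char) (l r : Nat), cs ≠ [] →
    unitsGo cs acc l r =
      (acc.reverse ++ cs.take (idxLoopA cs l r + 1)) ::
        unitsGo (cs.drop (idxLoopA cs l r + 1)) [] 0 0 := by
  induction cs with
  | nil => intro _ _ _ h; exact absurd rfl h
  | cons c rest ih =>
      intro acc l r _
      cases rest with
      | nil =>
          rw [unitsGo, show idxLoopA [c] l r =
              (if 0 < (if c = '(' then l + 1 else l) ∧
                  (if c = '(' then l + 1 else l) = (if c = ')' then r + 1 else r) then 0 else 0) from rfl]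
          split_ifs <;> simp [unitsGo]
      | cons d t =>
          rw [unitsGo, show idxLoopA (c :: d :: t) l r =
              (if 0 < (if c = '(' then l + 1 else l) ∧
                  (if c = '(' then l + 1 else l) = (if c = ')' then r + 1 else r) then 0
               else 1 + idxLoopA (d :: t) (if c = '(' then l + 1 else l)
                      (if c = ')' then r + 1 else r)) from rfl]
          generalize (if c = '(' then l + 1 else l) = l'
          generalize (if c = ')' then r + 1 else r) = r'
          by_cases hb : 0 < l' ∧ l' = r'
          · rw [if_pos hb, if_pos hb]
            simp
          · rw [if_neg hb, if_neg hb, ih (c :: acc) l' r' (by simp)]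
            have harith : 1 + idxLoopA (d :: t) l' r' + 1 = (idxLoopA (d :: t) l' r' + 1) + 1 := by omega
            rw [harith, List.take_succ_cons, List.drop_succ_cons]
            simp

-- A's recursion computes the foldr over the unit list.
theorem convertA_eq_foldUnits (cs : List Char) : convertA cs = foldUnits (unitsGo cs [] 0 0) := by
  generalize hn : cs.length = n
  induction n using Nat.strong_induction_on generalizing cs with
  | _ n ih =>
    by_cases h : cs = []
    · subst h
      simp [convertA, foldUnits, unitsGo]
    · rw [convertA, dif_neg h]
      simp only []
      have hlt : (cs.drop (idxLoopA cs 0 0 + 1)).length < n := by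
        have hp : 0 < cs.length := List.length_pos_iff.mpr h
        simp only [List.length_drop]
        omega
      have ihv : convertA (cs.drop (idxLoopA cs 0 0 + 1)) =
          foldUnits (unitsGo (cs.drop (idxLoopA cs 0 0 + 1)) [] 0 0) := ih _ hlt _ rfl
      unfold foldUnits at ihv ⊢
      rw [unitsGo_split cs [] 0 0 h, List.foldr_cons]
      simp only [List.reverse_nil, List.nil_append]
      rw [isValid_eq_bal (cs.take (idxLoopA cs 0 0 + 1)) [] 0]
      simp only [List.length_nil]
      rw [ihv, revA_eq_flip]
      rfl

-- Once ok is false, stepB keeps it false.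
theorem stepB_false (u : List Char) : ∀ d : Nat, (List.foldl stepB (false, d) u).1 = false := by
  induction u with
  | nil => intro d; rfl
  | cons c rest ih =>
      intro d
      by_cases hc : c = '(' <;> by_cases hd : d = 0 <;> simp [stepB, hc, hd, ih]

-- The counter scan balB equals the folded stepB state test.
theorem balB_eq_step (u : List Char) : ∀ d : Nat,
    balB u d = ((List.foldl stepB (true, d) u).1 && (List.foldl stepB (true, d) u).2 == 0) := by
  induction u with
  | nil => intro d; simp [balB]
  | cons c rest ih =>
      intro d
      by_cases hc : c = '('
      · simp [balB, stepB, hc, ih]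
      · by_cases hd : d = 0
        · simp [balB, stepB, hc, hd, stepB_false]
        · simp [balB, stepB, hc, hd, ih]

-- Main invariant of the fused pass: with the validity state equal to stepB folded
-- over the current unit so far, goB computes pre ++ foldUnits (units) ++ suf.
theorem goB_units (cs : List Char) : ∀ (cur : List Char) (l r : Nat) (s : Bool × Nat)
    (pre suf : List Char), List.foldl stepB (true, 0) cur.reverse = s →
    goB cs cur l r s pre suf = pre ++ foldUnits (unitsGo cs cur l r) ++ suf := by
  induction cs with
  | nil =>
      intro cur l r s pre suf hs
      by_cases h : cur = []
      · simp [goB, unitsGo, foldUnits, h]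
      · rw [goB, if_neg h, unitsGo, if_neg h]
        have hb : balB cur.reverse 0 = (s.1 && s.2 == 0) := by
          rw [balB_eq_step, hs]
        unfold foldUnits
        rw [List.foldr_cons, List.foldr_nil, hb]
        by_cases hv : (s.1 && s.2 == 0) = true
        · simp [hv]
        · rw [if_neg hv, if_neg hv]
          simp
  | cons c rest ih =>
      intro cur l r s pre suf hs
      rw [goB, unitsGo]
      have hstep : List.foldl stepB (true, 0) (c :: cur).reverse = stepB s c := by
        rw [List.reverse_cons, List.foldl_append, hs]; rfl
      by_cases hb : 0 < (if c = '(' then l + 1 else l) ∧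
          (if c = '(' then l + 1 else l) = (if c = ')' then r + 1 else r)
      · rw [if_pos hb, if_pos hb]
        have hval : balB (c :: cur).reverse 0 = ((stepB s c).1 && (stepB s c).2 == 0) := by
          rw [balB_eq_step, hstep]
        unfold foldUnits
        rw [List.foldr_cons, hval]
        by_cases hv : ((stepB s c).1 && (stepB s c).2 == 0) = true
        · rw [if_pos hv, if_pos hv, ih [] 0 0 (true, 0) (pre ++ (c :: cur).reverse) suf rfl]
          unfold foldUnits
          simp
        · rw [if_neg hv, if_neg hv,
              ih [] 0 0 (true, 0) (pre ++ ['('])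
                (')' :: flipB (PySem.List.slice (c :: cur).reverse (some 1) (some (-1))) ++ suf) rfl]
          unfold foldUnits
          simp
      · rw [if_neg hb, if_neg hb]
        exact ih (c :: cur) _ _ (stepB s c) pre suf hstep

-- ===== VERDICT (by name: the statement is the Claim_ definition above) =====
theorem convert_spec : Claim_equal_convert := by
  intro p _
  unfold Spec_convert convert convert_alt
  rw [convertA_eq_foldUnits, goB_units p.toList [] 0 0 (true, 0) [] [] rfl,
      List.nil_append, List.append_nil]
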